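-- pv_equiv track=rewrite | github.com/alonmega100/Palpation | CODE/scripts/collect_data.py | generate_xy_offsets
-- ===== SOURCE A (Python) =====
-- def generate_xy_offsets(nx, ny, dx, dy, order="raster"):
--     offsets = []
--     for j in range(ny):
--         xs = list(range(nx))
--         if order == "snake" and (j % 2 == 1):
--             xs = xs[::-1]
--         for i in xs:
--             offsets.append((i*dx, j*dy))
--     return offsets
-- ===== SOURCE B (Python) =====
-- def generate_xy_offsets(nx, ny, dx, dy, order="raster"):
--     if nx <= 0 or ny <= 0:
--         return []
--     snake = order == "snake"
--     out = []
--     for k in range(nx * ny):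
--         j, c = divmod(k, nx)
--         col = nx - 1 - c if snake and j % 2 == 1 else c
--         out.append((col * dx, j * dy))
--     return out
-- ===== Notes on version B (the rewrite author's own statement) =====
-- stated objective: alternative
-- what changed: Replaced the nested row/column loops (building an xs list and slice-reversing it on odd snake rows) with a single flat loop over one linear index k, deriving row j = k // nx, column c = k % nx and the snake reversal purely by arithmetic (nx-1-c), with no intermediate list.
import Mathlib
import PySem

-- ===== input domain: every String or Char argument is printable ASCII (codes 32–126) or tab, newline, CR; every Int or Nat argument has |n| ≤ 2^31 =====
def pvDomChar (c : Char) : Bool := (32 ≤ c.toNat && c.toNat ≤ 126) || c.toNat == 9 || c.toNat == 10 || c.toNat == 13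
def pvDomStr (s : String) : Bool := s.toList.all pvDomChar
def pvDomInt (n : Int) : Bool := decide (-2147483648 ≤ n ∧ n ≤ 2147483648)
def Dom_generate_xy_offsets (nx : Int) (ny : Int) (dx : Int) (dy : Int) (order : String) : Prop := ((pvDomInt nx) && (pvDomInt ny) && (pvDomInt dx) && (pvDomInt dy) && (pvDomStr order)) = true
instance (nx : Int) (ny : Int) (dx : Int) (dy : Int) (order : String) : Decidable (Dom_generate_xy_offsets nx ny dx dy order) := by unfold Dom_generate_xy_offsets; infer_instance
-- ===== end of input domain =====

-- B replaces the nested row/column loops and the slice-reversed xs list by one flat loop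
-- over a single linear index k, deriving the snake column by arithmetic (alternative decomposition).

-- ===== PORT A =====
def generate_xy_offsets (nx : Int) (ny : Int) (dx : Int) (dy : Int) (order : String) : List (Int × Int) :=
  -- offsets = []; for j in range(ny): xs = list(range(nx)); if snake and odd row: xs = xs[::-1];
  -- for i in xs: offsets.append((i*dx, j*dy))
  (PySem.List.pyRange 0 ny 1).foldl (fun offsets j =>
    let xs := PySem.List.pyRange 0 nx 1
    -- xs[::-1]: slice? with step -1 is always `some`, `.getD []` is exact here
    let xs := if order == "snake" && (PySem.Int.mod j 2 == 1)
              then (PySem.List.slice? xs none none (-1)).getD [] else xs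
    xs.foldl (fun offsets i => offsets ++ [(i * dx, j * dy)]) offsets) []

-- ===== PORT B =====
def generate_xy_offsets_alt (nx : Int) (ny : Int) (dx : Int) (dy : Int) (order : String) : List (Int × Int) :=
  if nx ≤ 0 || ny ≤ 0 then []
  else
    let snake := order == "snake"
    (PySem.List.pyRange 0 (nx * ny) 1).foldl (fun out k =>
      -- j, c = divmod(k, nx); nx > 0 here so divmod? is always `some`, `.getD` exact
      let jc := (PySem.Int.divmod? k nx).getD (0, 0)
      let j := jc.1
      let c := jc.2
      let col := if snake && (PySem.Int.mod j 2 == 1) then nx - 1 - c else c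
      out ++ [(col * dx, j * dy)]) []

-- ===== PRECONDITION & SPEC =====
def Spec_generate_xy_offsets (nx : Int) (ny : Int) (dx : Int) (dy : Int) (order : String) (out : List (Int × Int)) : Prop := out = generate_xy_offsets_alt nx ny dx dy order
instance (nx : Int) (ny : Int) (dx : Int) (dy : Int) (order : String) (out : List (Int × Int)) : Decidable (Spec_generate_xy_offsets nx ny dx dy order out) := by unfold Spec_generate_xy_offsets; infer_instance

-- ===== CLAIM (what is proved, stated in full; the proofs are below) =====
def Claim_equal_generate_xy_offsets : Prop := ∀ (nx : Int) (ny : Int) (dx : Int) (dy : Int) (order : String), Dom_generate_xy_offsets nx ny dx dy order → Spec_generate_xy_offsets nx ny dx dy order (generate_xy_offsets nx ny dx dy order)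

-- ===== LEMMAS AND PROOFS =====

-- reversing a mapped range reindexes it
theorem rev_map_range {α : Type} (n : Nat) (f : Nat → α) :
    ((List.range n).map f).reverse = (List.range n).map (fun k => f (n - 1 - k)) := by
  apply List.ext_getElem
  · simp
  · intro i h1 h2
    simp at h1
    simp [List.getElem_reverse]

theorem floordiv_block (nx : Int) (b : Nat) (c : Int) (hnx : 0 < nx) (hc0 : 0 ≤ c) (hc : c < nx) :
    PySem.Int.floordiv (nx * b + c) nx = b := by
  rw [PySem.Int.floordiv_eq_iff_of_pos hnx]
  constructor <;> nlinarith

theorem mod_block (nx : Int) (b : Nat) (c : Int) (hnx : 0 < nx) (hc0 : 0 ≤ c) (hc : c < nx) :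
    PySem.Int.mod (nx * b + c) nx = c := by
  have h := PySem.Int.floordiv_mul_add_mod (nx * b + c) nx
  rw [floordiv_block nx b c hnx hc0 hc] at h
  linarith

-- the core identity: flat k-loop over one block row = one row of A
theorem main_lemma (nx dx dy : Int) (s : Bool) (hnx : 0 < nx) (b : Nat) :
    ((PySem.List.pyRange 0 (nx * (b : Int)) 1).map (fun k =>
        (((if s && (PySem.Int.mod (PySem.Int.floordiv k nx) 2 == 1)
            then nx - 1 - PySem.Int.mod k nx else PySem.Int.mod k nx)) * dx,
         PySem.Int.floordiv k nx * dy)))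
    = (PySem.List.pyRange 0 (b : Int) 1).flatMap (fun j =>
        (if s && (PySem.Int.mod j 2 == 1)
          then ((PySem.List.slice? (PySem.List.pyRange 0 nx 1) none none (-1)).getD [])
          else PySem.List.pyRange 0 nx 1).map (fun i => (i * dx, j * dy))) := by
  induction b with
  | zero => simp [PySem.List.pyRange_one_eq_nil]
  | succ b ih =>
    have h1 : (0 : Int) ≤ nx * (b : Int) := by positivity
    have h2 : nx * (b : Int) ≤ nx * ((b : Int) + 1) := by nlinarith
    have hb1 : ((b + 1 : Nat) : Int) = (b : Int) + 1 := by push_cast; ring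
    rw [hb1, PySem.List.pyRange_one_append 0 (nx * (b : Int)) (nx * ((b : Int) + 1)) h1 h2,
        PySem.List.pyRange_one_succ_right (by positivity), List.map_append, List.flatMap_append, ih]
    congr 1
    -- one block: pyRange (nx*b) (nx*(b+1)) 1 mapped = row b
    rw [PySem.List.pyRange_one (nx * (b : Int)) (nx * ((b : Int) + 1))]
    have hlen : (nx * ((b : Int) + 1) - nx * (b : Int)).toNat = nx.toNat := by
      have : nx * ((b : Int) + 1) - nx * (b : Int) = nx := by ring
      rw [this]
    rw [hlen, List.map_map, List.flatMap_singleton]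
    have hmem : ∀ c ∈ List.range nx.toNat,
        ((fun k =>
          (((if s && (PySem.Int.mod (PySem.Int.floordiv k nx) 2 == 1)
              then nx - 1 - PySem.Int.mod k nx else PySem.Int.mod k nx)) * dx,
           PySem.Int.floordiv k nx * dy)) ∘ (fun k : Nat => nx * (b : Int) + (k : Int))) c
        = (((if s && (PySem.Int.mod (b : Int) 2 == 1) then nx - 1 - (c : Int) else (c : Int)) * dx,
            (b : Int) * dy)) := by
      intro c hc
      have hc' : (c : Int) < nx := by
        have := List.mem_range.mp hc; omega
      simp only [Function.comp]
      rw [floordiv_block nx b (c : Int) hnx (by positivity) hc',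
          mod_block nx b (c : Int) hnx (by positivity) hc']
    rw [List.map_congr_left hmem]
    by_cases hs : s && (PySem.Int.mod (b : Int) 2 == 1)
    · simp only [hs, if_pos]
      rw [PySem.List.slice?_none_none_neg_one, Option.getD_some,
          PySem.List.pyRange_one 0 nx, rev_map_range, List.map_map]
      simp only [sub_zero, zero_add]
      apply List.map_congr_left
      intro c hc
      have hc' : c < nx.toNat := List.mem_range.mp hc
      have hnx' : (1 : Int) ≤ nx := hnx
      have hcast : ((nx.toNat - 1 - c : Nat) : Int) = nx - 1 - (c : Int) := by omega
      simp only [Function.comp, hcast]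
    · simp only [hs, if_false, Bool.false_eq_true]
      rw [PySem.List.pyRange_one 0 nx, List.map_map]
      simp only [sub_zero, zero_add]
      apply List.map_congr_left
      intro c hc
      simp [Function.comp]

-- ===== VERDICT (by name: the statement is the Claim_ definition above) =====
theorem generate_xy_offsets_spec : Claim_equal_generate_xy_offsets := by
  intro nx ny dx dy order _
  unfold Spec_generate_xy_offsets generate_xy_offsets generate_xy_offsets_alt
  by_cases hdeg : nx ≤ 0 ∨ ny ≤ 0
  · rw [if_pos (by rcases hdeg with h | h <;> simp [h])]
    rcases hdeg with h | h
    · -- nx ≤ 0: every row is empty, the fold never appends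
      have hx : PySem.List.pyRange 0 nx 1 = [] := PySem.List.pyRange_one_eq_nil h
      rw [hx]
      refine (PySem.List.foldl_congr_mem _ _ (fun acc _ => acc) _ ?_).trans (List.foldl_fixed _)
      intro acc j _
      show List.foldl (fun offsets i => offsets ++ [(i * dx, j * dy)]) acc
            (if (order == "snake" && PySem.Int.mod j 2 == 1) = true
             then (PySem.List.slice? ([] : List Int) none none (-1)).getD [] else []) = acc
      rw [PySem.List.slice?_none_none_neg_one]
      split_ifs <;> rfl
    · rw [PySem.List.pyRange_one_eq_nil h]; rfl
  · have hnx : 0 < nx := by omega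
    have hny : 0 < ny := by omega
    rw [if_neg (by simp [decide_eq_true_eq]; omega)]
    simp only [PySem.List.foldl_append_singleton_eq_map]
    rw [PySem.List.foldl_append_eq_flatMap]
    simp only [List.nil_append]
    have hb : ny = ((ny.toNat : Nat) : Int) := by omega
    rw [hb]
    rw [← main_lemma nx dx dy (order == "snake") (by omega) ny.toNat]
    apply List.map_congr_left
    intro k hk
    have hk' := (PySem.List.mem_pyRange_one).mp hk
    have hnx' : nx ≠ 0 := by omega
    simp only [PySem.Int.divmod?, hnx']
    rfl
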